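-- pv_equiv track=rewrite | github.com/Druneau/aoc2023 | day14/day14.py | calc_tilt_load
-- ===== SOURCE A (Python) =====
-- def calc_tilt_load(noted_list):
--
--     cumulative_load = 0
--
--     max_load = len(noted_list)
--     cube_load = max_load
--     rolling_count = 0
--
--     for i in range(max_load):
--
--         entry = noted_list[i]
--         if 'O' == entry:
--             rolling_count += 1
--         elif '#' == entry:
--             for rolling in range(rolling_count):
--                 this_load = cube_load - rolling
--                 cumulative_load += this_load
--
--             cube_load = max_load - i - 1
--             rolling_count = 0
--
--     if rolling_count > 0:
--         # account for remaining rolling rocks!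
--         for rolling in range(rolling_count):
--             this_load = cube_load - rolling
--             cumulative_load += this_load
--
--     return cumulative_load
-- ===== SOURCE B (Python) =====
-- def calc_tilt_load(noted_list):
--     total = 0
--     next_free = len(noted_list)
--     for i, entry in enumerate(noted_list):
--         if entry == 'O':
--             total += next_free
--             next_free -= 1
--         elif entry == '#':
--             next_free = len(noted_list) - i - 1
--     return total
-- ===== Notes on version B (the rewrite author's own statement) =====
-- stated objective: simpler
-- what changed: B replaces A's rolling-rock counter with its nested replay loop (summing an arithmetic series at each '#' and again after the loop) by a single pass that maintains the next free load position: each 'O' contributes that position directly and '#' resets it.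
import Mathlib
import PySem

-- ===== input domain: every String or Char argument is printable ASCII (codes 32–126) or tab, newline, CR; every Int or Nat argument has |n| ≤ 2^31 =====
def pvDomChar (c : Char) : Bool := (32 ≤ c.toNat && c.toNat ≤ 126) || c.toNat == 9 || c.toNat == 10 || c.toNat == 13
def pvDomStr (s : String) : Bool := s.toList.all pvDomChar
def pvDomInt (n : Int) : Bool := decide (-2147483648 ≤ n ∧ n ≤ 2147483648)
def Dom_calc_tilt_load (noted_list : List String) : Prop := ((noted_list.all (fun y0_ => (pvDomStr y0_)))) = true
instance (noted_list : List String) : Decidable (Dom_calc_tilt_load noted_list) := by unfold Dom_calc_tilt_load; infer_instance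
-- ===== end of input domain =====

-- B replaces A's rolling-rock counter and its nested replay loops by a single pass
-- maintaining the next free load position (objective: simpler).

-- ===== PORT A =====
-- state: (cumulative_load, cube_load, rolling_count)
def calc_tilt_load (noted_list : List String) : Int :=
  let max_load : Int := noted_list.length
  let s :=
    (PySem.List.pyRange 0 max_load 1).foldl
      (fun (st : Int × Int × Int) i =>
        let entry := PySem.List.pyGetD noted_list i ""   -- index always in range here
        if entry = "O" then (st.1, st.2.1, st.2.2 + 1)
        else if entry = "#" then
          ((PySem.List.pyRange 0 st.2.2 1).foldl
              (fun c rolling => c + (st.2.1 - rolling)) st.1,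
            max_load - i - 1, 0)
        else st)
      (0, max_load, 0)
  if s.2.2 > 0 then
    (PySem.List.pyRange 0 s.2.2 1).foldl (fun c rolling => c + (s.2.1 - rolling)) s.1
  else s.1

-- ===== PORT B =====
-- state: (total, next_free)
def calc_tilt_load_alt (noted_list : List String) : Int :=
  let n : Int := noted_list.length
  let s :=
    (PySem.List.enumerate noted_list 0).foldl
      (fun (st : Int × Int) p =>
        if p.2 = "O" then (st.1 + st.2, st.2 - 1)
        else if p.2 = "#" then (st.1, n - p.1 - 1)
        else st)
      (0, n)
  s.1

-- ===== PRECONDITION & SPEC =====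
def Spec_calc_tilt_load (noted_list : List String) (out : Int) : Prop := out = calc_tilt_load_alt noted_list
instance (noted_list : List String) (out : Int) : Decidable (Spec_calc_tilt_load noted_list out) := by unfold Spec_calc_tilt_load; infer_instance

-- ===== CLAIM (what is proved, stated in full; the proofs are below) =====
def Claim_equal_calc_tilt_load : Prop := ∀ (noted_list : List String), Dom_calc_tilt_load noted_list → Spec_calc_tilt_load noted_list (calc_tilt_load noted_list)

-- ===== LEMMAS AND PROOFS =====

-- the arithmetic series A replays at a barrier, as a closed value
def pvRsum (cube rc : Int) : Int :=
  ((PySem.List.pyRange 0 rc 1).map (fun r => cube - r)).sum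

theorem pv_foldl_add (l : List Int) (f : Int → Int) :
    ∀ (c : Int), l.foldl (fun acc x => acc + f x) c = c + (l.map f).sum := by
  induction l with
  | nil => intro c; simp
  | cons x t ih => intro c; simp [List.foldl_cons, ih (c + f x)]; ring

theorem pvRsum_foldl (cube rc c : Int) :
    (PySem.List.pyRange 0 rc 1).foldl (fun acc rolling => acc + (cube - rolling)) c
      = c + pvRsum cube rc := by
  simpa [pvRsum] using pv_foldl_add (PySem.List.pyRange 0 rc 1) (fun r => cube - r) c

theorem pvRsum_zero (cube : Int) : pvRsum cube 0 = 0 := by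
  simp [pvRsum]

theorem pvRsum_succ (cube rc : Int) (h : 0 ≤ rc) :
    pvRsum cube (rc + 1) = pvRsum cube rc + (cube - rc) := by
  rw [pvRsum, PySem.List.pyRange_one_succ_right h]
  simp [pvRsum]

-- A-side loop body (n the fixed list length)
def pvStepA (n : Int) (st : Int × Int × Int) (p : Int × String) : Int × Int × Int :=
  if p.2 = "O" then (st.1, st.2.1, st.2.2 + 1)
  else if p.2 = "#" then
    ((PySem.List.pyRange 0 st.2.2 1).foldl (fun c rolling => c + (st.2.1 - rolling)) st.1,
      n - p.1 - 1, 0)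
  else st

-- B-side loop body
def pvStepB (n : Int) (st : Int × Int) (p : Int × String) : Int × Int :=
  if p.2 = "O" then (st.1 + st.2, st.2 - 1)
  else if p.2 = "#" then (st.1, n - p.1 - 1)
  else st

-- loop invariant: tot = cum + pvRsum cube rc, nf = cube - rc, 0 ≤ rc
theorem pv_inv (n : Int) (xs : List String) :
    ∀ (s cum cube rc tot nf : Int), 0 ≤ rc →
      tot = cum + pvRsum cube rc → nf = cube - rc →
      (let sA := (PySem.List.enumerate xs s).foldl (pvStepA n) (cum, cube, rc)
       let sB := (PySem.List.enumerate xs s).foldl (pvStepB n) (tot, nf)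
       0 ≤ sA.2.2 ∧ sB.1 = sA.1 + pvRsum sA.2.1 sA.2.2 ∧ sB.2 = sA.2.1 - sA.2.2) := by
  induction xs with
  | nil => intro s cum cube rc tot nf h0 h1 h2; simpa using ⟨h0, h1, h2⟩
  | cons x t ih =>
    intro s cum cube rc tot nf h0 h1 h2
    simp only [PySem.List.enumerate_cons, List.foldl_cons]
    by_cases hO : x = "O"
    · have := ih (s + 1) cum cube (rc + 1) (tot + nf) (nf - 1)
        (by omega) (by rw [h1, h2, pvRsum_succ cube rc h0]; ring) (by omega)
      simpa [pvStepA, pvStepB, hO] using this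
    · by_cases hH : x = "#"
      · have := ih (s + 1)
          ((PySem.List.pyRange 0 rc 1).foldl (fun c rolling => c + (cube - rolling)) cum)
          (n - s - 1) 0 tot (n - s - 1)
          le_rfl (by rw [pvRsum_foldl, pvRsum_zero, h1]; ring) (by ring)
        simpa [pvStepA, pvStepB, hO, hH] using this
      · have := ih (s + 1) cum cube rc tot nf h0 h1 h2
        simpa [pvStepA, pvStepB, hO, hH] using this

theorem pv_main (xs : List String) :
    calc_tilt_load xs = calc_tilt_load_alt xs := by
  have hA : calc_tilt_load xs =
      (let sA := (PySem.List.pyRange 0 (xs.length : Int) 1).foldl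
          (fun st i => pvStepA (xs.length : Int) st (i, PySem.List.pyGetD xs i ""))
          (0, (xs.length : Int), 0)
       if sA.2.2 > 0 then
         (PySem.List.pyRange 0 sA.2.2 1).foldl (fun c r => c + (sA.2.1 - r)) sA.1
       else sA.1) := rfl
  have hB : calc_tilt_load_alt xs =
      ((PySem.List.enumerate xs 0).foldl (pvStepB (xs.length : Int))
        (0, (xs.length : Int))).1 := rfl
  have h := pv_inv (xs.length : Int) xs 0 0 (xs.length : Int) 0 0 (xs.length : Int)
      le_rfl (by rw [pvRsum_zero]; ring) (by ring)
  rw [hA, hB]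
  simp only [PySem.List.enumerate_eq_map_pyRange (d := ""), List.foldl_map,
    PySem.List.len_eq] at h ⊢
  obtain ⟨h0, h1, h2⟩ := h
  rw [h1]
  split_ifs with hpos
  · exact pvRsum_foldl _ _ _
  · have hz : _ = (0 : Int) := le_antisymm (by omega) h0
    rw [hz, pvRsum_zero, add_zero]

-- ===== VERDICT (by name: the statement is the Claim_ definition above) =====
theorem calc_tilt_load_spec : Claim_equal_calc_tilt_load := by
  intro noted_list _
  unfold Spec_calc_tilt_load
  exact pv_main noted_list
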